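-- pv_equiv track=rewrite | github.com/suraj-iitb/algorithm-identification | tbcnn/crawler/data/shell/python3/shell3575818.py | genG
-- ===== SOURCE A (Python) =====
-- def genG(n):
--   G = []
--   y = 1
--   x = 1
--   while y <= n:
--     G.append(y)
--     y = y + 3**x
--     x += 1
--   return G[::-1]
-- ===== SOURCE B (Python) =====
-- def genG(n):
--   m = 0
--   while (3 ** (m + 1) - 1) // 2 <= n:
--     m += 1
--   return [(3 ** i - 1) // 2 for i in range(m, 0, -1)]
-- ===== Notes on version B (the rewrite author's own statement) =====
-- stated objective: simpler
-- what changed: Replaces A's running partial-sum accumulator, appended list and final reversal with a per-term closed-form power formula: B finds the term count and emits the terms directly in descending order via a comprehension.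
import Mathlib
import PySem

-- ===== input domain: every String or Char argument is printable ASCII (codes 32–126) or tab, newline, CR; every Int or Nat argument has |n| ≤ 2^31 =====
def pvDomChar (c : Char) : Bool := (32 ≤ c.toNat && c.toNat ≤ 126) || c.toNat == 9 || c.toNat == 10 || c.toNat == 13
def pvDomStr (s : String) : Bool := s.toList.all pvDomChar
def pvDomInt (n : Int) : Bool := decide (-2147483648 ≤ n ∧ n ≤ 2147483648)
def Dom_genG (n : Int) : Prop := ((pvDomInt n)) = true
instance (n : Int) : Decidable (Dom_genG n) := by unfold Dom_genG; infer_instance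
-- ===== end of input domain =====

-- B replaces A's running partial-sum accumulator and final reversal with the closed form
-- (3^k - 1)//2 per term, emitted directly in descending order (objective: simpler).

-- ===== PORT A =====
-- the while loop of A: state (y, x, G); terminates since y strictly grows
def genGLoop (n y x : Int) (G : List Int) : List Int :=
  if y ≤ n then genGLoop n (y + 3 ^ x.toNat) (x + 1) (G ++ [y]) else G
termination_by (n + 1 - y).toNat
decreasing_by
  have h3 : (0:Int) < 3 ^ x.toNat := pow_pos (by norm_num) _
  omega

-- G[::-1] is List.reverse (PySem.List.slice?_none_none_neg_one)
def genG (n : Int) : List Int := (genGLoop n 1 1 []).reverse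

-- ===== PORT B =====
-- B's while loop: advance m while (3**(m+1) - 1)//2 <= n
def findM (n : Int) (m : Nat) : Nat :=
  if PySem.Int.floordiv (3 ^ (m + 1) - 1) 2 ≤ n then findM n (m + 1) else m
termination_by (n + 1 - PySem.Int.floordiv (3 ^ (m + 1) - 1) 2).toNat
decreasing_by
  have h0 : (0:Int) < 3 ^ (m + 1) := pow_pos (by norm_num) _
  simp only [PySem.Int.floordiv_eq_ediv_of_pos (show (0:Int) < 2 by norm_num)] at *
  omega

def genG_alt (n : Int) : List Int :=
  (PySem.List.pyRange (findM n 0) 0 (-1)).map (fun i => PySem.Int.floordiv (3 ^ i.toNat - 1) 2)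

-- ===== PRECONDITION & SPEC =====
def Spec_genG (n : Int) (out : List Int) : Prop := out = genG_alt n
instance (n : Int) (out : List Int) : Decidable (Spec_genG n out) := by unfold Spec_genG; infer_instance

-- ===== CLAIM (what is proved, stated in full; the proofs are below) =====
def Claim_equal_genG : Prop := ∀ (n : Int), Dom_genG n → Spec_genG n (genG n)

-- ===== LEMMAS AND PROOFS =====

-- t k = (3^k - 1)/2, the k-th value A's accumulator takes
def t : Nat → Int
  | 0 => 0
  | k + 1 => t k + 3 ^ k

lemma two_t (k : Nat) : 2 * t k = 3 ^ k - 1 := by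
  induction k with
  | zero => simp [t]
  | succ k ih => rw [t, pow_succ]; omega

lemma fd_t (k : Nat) : PySem.Int.floordiv ((3:Int) ^ k - 1) 2 = t k := by
  rw [PySem.Int.floordiv_eq_ediv_of_pos (by norm_num), ← two_t k]
  omega

lemma findM_ge (n : Int) (m : Nat) : m ≤ findM n m := by
  induction m using findM.induct n with
  | case1 m h ih => rw [findM, if_pos h]; omega
  | case2 m h => rw [findM, if_neg h]

lemma loop_eq (n : Int) (m : Nat) (G : List Int) :
    genGLoop n (t (m + 1)) ((m : Int) + 1) G
      = G ++ (List.range' (m + 1) (findM n m - m)).map t := by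
  induction m using findM.induct n generalizing G with
  | case1 m h ih =>
    rw [fd_t] at h
    rw [genGLoop, if_pos h]
    have hx : ((m : Int) + 1).toNat = m + 1 := by omega
    have hy : t (m + 1) + 3 ^ ((m : Int) + 1).toNat = t (m + 1 + 1) := by
      rw [hx]; simp [t]
    have hx2 : (m : Int) + 1 + 1 = ((m + 1 : Nat) : Int) + 1 := by push_cast; ring
    rw [hy, hx2, ih]
    have hM : m + 1 ≤ findM n (m + 1) := findM_ge n (m + 1)
    have hstep : findM n m = findM n (m + 1) := by
      conv_lhs => rw [findM]
      rw [if_pos (by rw [fd_t]; exact h)]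
    rw [hstep]
    have hd : findM n (m + 1) - m = (findM n (m + 1) - (m + 1)) + 1 := by omega
    rw [hd, List.range'_succ, List.map_cons, List.append_assoc]
    rfl
  | case2 m h =>
    rw [fd_t] at h
    have hstop : findM n m = m := by
      conv_lhs => rw [findM]
      rw [if_neg (by rw [fd_t]; exact h)]
    rw [genGLoop, if_neg h, hstop]
    simp

lemma genG_eq (n : Int) : genG n = ((List.range' 1 (findM n 0)).map t).reverse := by
  have h1 : (1 : Int) = t (0 + 1) := by simp [t]
  have h2 : genGLoop n 1 1 [] = genGLoop n (t (0 + 1)) (((0:Nat) : Int) + 1) [] := by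
    norm_num [← h1]
  rw [genG, h2, loop_eq]
  simp

-- ===== VERDICT (by name: the statement is the Claim_ definition above) =====
theorem genG_spec : Claim_equal_genG := by
  intro n _
  show genG n = genG_alt n
  rw [genG_eq, genG_alt]
  set M := findM n 0 with hM
  rw [PySem.List.pyRange_neg_one]
  apply List.ext_getElem
  · simp
  · intro j h1 h2
    have hlen : (List.map t (List.range' 1 M)).length = M := by simp
    simp only [List.getElem_reverse, List.getElem_map, List.getElem_range,
      List.getElem_range', hlen] at *
    have hjM : j < M := by simpa using h2
    rw [show ((M : Int) - (j : Int)).toNat = M - j by omega, fd_t]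
    congr 1
    omega
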